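-- pv_equiv track=rewrite | github.com/ajcasagrande/aiperf | test_libcurl_performance.py | generate_synthetic_payloads
-- ===== SOURCE A (Python) =====
-- def generate_synthetic_payloads(
--     count: int = 20, tokens_per_payload: int = 100
-- ) -> list[str]:
--     """Generate synthetic chat payloads with approximately the specified token count."""
--
--     # Base words to create variety (roughly 1 token per word for estimation)
--     base_words = [
--         "artificial",
--         "intelligence",
--         "machine",
--         "learning",
--         "neural",
--         "network",
--         "algorithm",
--         "data",
--         "science",
--         "technology",
--         "computer",
--         "programming",
--         "software",
--         "development",
--         "innovation",
--         "research",
--         "analysis",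
--         "model",
--         "training",
--         "optimization",
--         "performance",
--         "efficiency",
--         "scalability",
--         "automation",
--         "prediction",
--         "classification",
--         "regression",
--         "clustering",
--         "deep",
--         "reinforcement",
--         "supervised",
--         "unsupervised",
--         "feature",
--         "extraction",
--         "preprocessing",
--         "validation",
--         "testing",
--         "deployment",
--         "production",
--         "monitoring",
--         "evaluation",
--         "metrics",
--         "accuracy",
--         "precision",
--         "recall",
--         "framework",
--         "library",
--         "pipeline",
--         "workflow",
--     ]
--
--     payloads = []
--     for i in range(count):
--         # Create a unique prompt for each request
--         topic = f"Request {i + 1}"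
--
--         # Generate approximately 100 tokens by repeating words
--         words_needed = tokens_per_payload - 20  # Account for base prompt structure
--         prompt_words = []
--
--         for j in range(words_needed):
--             word_idx = (i * words_needed + j) % len(base_words)
--             prompt_words.append(base_words[word_idx])
--
--         payload = f"""
--         {topic}: Please analyze the following concepts and provide insights on their relationships:
--         {" ".join(prompt_words[: tokens_per_payload - 20])}
--
--         Focus on practical applications and future implications.
--         """.strip()
--
--         payloads.append(payload)
--
--     return payloads
-- ===== SOURCE B (Python) =====
-- def generate_synthetic_payloads(
--     count: int = 20, tokens_per_payload: int = 100
-- ) -> list[str]: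
--     """Generate synthetic chat payloads with approximately the specified token count."""
--
--     base_words = [
--         "artificial",
--         "intelligence",
--         "machine",
--         "learning",
--         "neural",
--         "network",
--         "algorithm",
--         "data",
--         "science",
--         "technology",
--         "computer",
--         "programming",
--         "software",
--         "development",
--         "innovation",
--         "research",
--         "analysis",
--         "model",
--         "training",
--         "optimization",
--         "performance",
--         "efficiency",
--         "scalability",
--         "automation",
--         "prediction",
--         "classification",
--         "regression",
--         "clustering",
--         "deep",
--         "reinforcement",
--         "supervised",
--         "unsupervised",
--         "feature",
--         "extraction",
--         "preprocessing",
--         "validation",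
--         "testing",
--         "deployment",
--         "production",
--         "monitoring",
--         "evaluation",
--         "metrics",
--         "accuracy",
--         "precision",
--         "recall",
--         "framework",
--         "library",
--         "pipeline",
--         "workflow",
--     ]
--
--     words_per_payload = max(0, tokens_per_payload - 20)
--     payloads = []
--     pos = 0  # running position in the cyclic word source
--     for i in range(count):
--         # tile the word list far enough to cover this payload's chunk, then slice it out
--         tiled = base_words * ((pos + words_per_payload) // len(base_words) + 1)
--         chunk = tiled[pos : pos + words_per_payload]
--         pos = (pos + words_per_payload) % len(base_words)
--
--         payload = f"""
--         Request {i + 1}: Please analyze the following concepts and provide insights on their relationships: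
--         {" ".join(chunk)}
--
--         Focus on practical applications and future implications.
--         """.strip()
--
--         payloads.append(payload)
--
--     return payloads
-- ===== Notes on version B (the rewrite author's own statement) =====
-- stated objective: alternative
-- what changed: Replaces the inner per-word loop with its modular index (i*words_needed+j)%len(base_words) by a running cursor into the cyclic word source: each payload's word chunk is sliced in one step out of a tiled copy of the word list, and the cursor advances modulo the list length across payloads.
import Mathlib
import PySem

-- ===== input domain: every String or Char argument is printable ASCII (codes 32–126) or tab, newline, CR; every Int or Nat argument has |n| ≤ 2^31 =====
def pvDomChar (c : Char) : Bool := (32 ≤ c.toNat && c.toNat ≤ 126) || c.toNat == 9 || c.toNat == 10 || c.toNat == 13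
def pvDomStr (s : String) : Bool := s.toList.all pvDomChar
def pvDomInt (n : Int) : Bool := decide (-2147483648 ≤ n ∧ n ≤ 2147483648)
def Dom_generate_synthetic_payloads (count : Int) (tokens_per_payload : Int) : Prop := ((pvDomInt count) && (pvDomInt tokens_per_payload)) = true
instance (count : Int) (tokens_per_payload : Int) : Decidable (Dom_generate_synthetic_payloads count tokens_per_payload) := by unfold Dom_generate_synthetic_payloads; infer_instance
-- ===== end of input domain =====

-- ===== PORT A =====
-- B replaces A's per-word modular indexing by a running cursor into a tiled copy of the
-- word list, slicing each payload's chunk out in one step (objective: alternative decomposition).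
def pvBaseWords : List String := ["artificial", "intelligence", "machine", "learning", "neural", "network", "algorithm", "data", "science", "technology", "computer", "programming", "software", "development", "innovation", "research", "analysis", "model", "training", "optimization", "performance", "efficiency", "scalability", "automation", "prediction", "classification", "regression", "clustering", "deep", "reinforcement", "supervised", "unsupervised", "feature", "extraction", "preprocessing", "validation", "testing", "deployment", "production", "monitoring", "evaluation", "metrics", "accuracy", "precision", "recall", "framework", "library", "pipeline", "workflow"]

def generate_synthetic_payloads (count : Int) (tokens_per_payload : Int) : List String :=
  (PySem.List.pyRange 0 count 1).foldl (fun payloads i =>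
    let topic := "Request " ++ PySem.Int.toStr (i + 1)
    let words_needed := tokens_per_payload - 20
    let prompt_words := (PySem.List.pyRange 0 words_needed 1).foldl (fun pw j =>
      let word_idx := PySem.Int.mod (i * words_needed + j) (pvBaseWords.length : Int)
      pw ++ [PySem.List.pyGetD pvBaseWords word_idx ""]) []
    let payload := PySem.Str.strip ("\n        " ++ (topic ++ (": Please analyze the following concepts and provide insights on their relationships:\n        " ++ (PySem.Str.join " " (PySem.List.slice prompt_words none (some (tokens_per_payload - 20))) ++ "\n\n        Focus on practical applications and future implications.\n        "))))
    payloads ++ [payload]) []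

-- ===== PORT B =====
def generate_synthetic_payloads_alt (count : Int) (tokens_per_payload : Int) : List String :=
  let words_per_payload : Int := max 0 (tokens_per_payload - 20)
  ((PySem.List.pyRange 0 count 1).foldl (fun (st : List String × Int) i =>
    let payloads := st.1
    let pos := st.2
    let tiled := PySem.List.pyRepeat pvBaseWords (PySem.Int.floordiv (pos + words_per_payload) (pvBaseWords.length : Int) + 1)
    let chunk := PySem.List.slice tiled (some pos) (some (pos + words_per_payload))
    let pos' := PySem.Int.mod (pos + words_per_payload) (pvBaseWords.length : Int)
    let payload := PySem.Str.strip ("\n        Request " ++ (PySem.Int.toStr (i + 1) ++ (": Please analyze the following concepts and provide insights on their relationships:\n        " ++ (PySem.Str.join " " chunk ++ "\n\n        Focus on practical applications and future implications.\n        "))))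
    (payloads ++ [payload], pos')) ([], 0)).1

-- ===== PRECONDITION & SPEC =====
def Spec_generate_synthetic_payloads (count : Int) (tokens_per_payload : Int) (out : List String) : Prop := out = generate_synthetic_payloads_alt count tokens_per_payload
instance (count : Int) (tokens_per_payload : Int) (out : List String) : Decidable (Spec_generate_synthetic_payloads count tokens_per_payload out) := by unfold Spec_generate_synthetic_payloads; infer_instance

-- ===== CLAIM (what is proved, stated in full; the proofs are below) =====
def Claim_equal_generate_synthetic_payloads : Prop := ∀ (count : Int) (tokens_per_payload : Int), Dom_generate_synthetic_payloads count tokens_per_payload → Spec_generate_synthetic_payloads count tokens_per_payload (generate_synthetic_payloads count tokens_per_payload)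

-- ===== LEMMAS AND PROOFS =====

theorem pv_len : (pvBaseWords.length : Int) = 49 := by decide

-- indexing a tiled (replicated-and-flattened) list is modular indexing into the base list
theorem pv_rep_get (xs : List String) (m k : Nat) (hk : k < m * xs.length) :
    ((List.replicate m xs).flatten)[k]? = xs[k % xs.length]? := by
  induction m generalizing k with
  | zero => omega
  | succ m ih =>
    rw [Nat.succ_mul] at hk
    simp only [List.replicate_succ, List.flatten_cons]
    by_cases h : k < xs.length
    · rw [List.getElem?_append_left h, Nat.mod_eq_of_lt h]
    · rw [not_lt] at h
      rw [List.getElem?_append_right h, ih (k - xs.length) (by omega),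
        Nat.mod_eq_sub_mod h]

-- B's sliced chunk, as a map over the range, for a cursor 0 ≤ p < 49
theorem pv_rep_len (xs : List String) (m : Nat) : ((List.replicate m xs).flatten).length = m * xs.length := by
  induction m with
  | zero => simp
  | succ m ih => simp only [List.replicate_succ, List.flatten_cons, List.length_append, ih, Nat.succ_mul]; omega

theorem pv_chunk_eq (p n : Nat) :
    PySem.List.slice (PySem.List.pyRepeat pvBaseWords (PySem.Int.floordiv ((p : Int) + (n : Int)) 49 + 1)) (some (p : Int)) (some ((p : Int) + (n : Int))) =
    (List.range n).map (fun (k : Nat) => PySem.List.pyGetD pvBaseWords (PySem.Int.mod ((p : Int) + (k : Int)) 49) "") := by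
  have hm : PySem.Int.floordiv ((p : Int) + (n : Int)) 49 + 1 = (((p + n) / 49 + 1 : Nat) : Int) := by
    rw [PySem.Int.floordiv_eq_ediv_of_pos (by norm_num)]
    push_cast
    omega
  rw [hm, PySem.List.slice_natCast_add]
  have hlen : (PySem.List.pyRepeat pvBaseWords (((p + n) / 49 + 1 : Nat) : Int)).length = ((p + n) / 49 + 1) * 49 := by
    unfold PySem.List.pyRepeat
    rw [Int.toNat_natCast, pv_rep_len]
    rfl
  apply List.ext_getElem?
  intro k
  rw [List.getElem?_take, List.getElem?_drop, List.getElem?_map]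
  by_cases hk : k < n
  · rw [if_pos hk]
    have hbound : p + k < ((p + n) / 49 + 1) * 49 := by omega
    have hget : (PySem.List.pyRepeat pvBaseWords (((p + n) / 49 + 1 : Nat) : Int))[p + k]? = pvBaseWords[(p + k) % 49]? := by
      unfold PySem.List.pyRepeat
      rw [Int.toNat_natCast]
      have := pv_rep_get pvBaseWords ((p + n) / 49 + 1) (p + k) (by simpa using hbound)
      simpa using this
    rw [hget, List.getElem?_range hk]
    have hmod : (p + k) % 49 < 49 := Nat.mod_lt _ (by norm_num)
    have hmod' : (p + k) % 49 < pvBaseWords.length := by simpa [pvBaseWords] using hmod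
    rw [List.getElem?_eq_getElem hmod']
    simp only [Option.map_some]
    congr 1
    have hidx : PySem.Int.mod ((p : Int) + (k : Int)) 49 = (((p + k) % 49 : Nat) : Int) := by
      rw [PySem.Int.mod_eq_emod_of_pos (by norm_num)]
      push_cast
      omega
    rw [hidx, PySem.List.pyGetD_natCast, List.getD_eq_getElem _ _ hmod']
  · rw [if_neg hk, List.getElem?_eq_none (by simpa using not_lt.mp hk), Option.map_none]

-- the two per-payload word chunks coincide
theorem pv_words_eq (i wn : Int) (_hi : 0 ≤ i) :
    PySem.List.slice ((PySem.List.pyRange 0 wn 1).foldl (fun pw j =>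
        pw ++ [PySem.List.pyGetD pvBaseWords (PySem.Int.mod (i * wn + j) (pvBaseWords.length : Int)) ""]) []) none (some wn) =
    PySem.List.slice (PySem.List.pyRepeat pvBaseWords (PySem.Int.floordiv (PySem.Int.mod (i * max 0 wn) (pvBaseWords.length : Int) + max 0 wn) (pvBaseWords.length : Int) + 1)) (some (PySem.Int.mod (i * max 0 wn) (pvBaseWords.length : Int))) (some (PySem.Int.mod (i * max 0 wn) (pvBaseWords.length : Int) + max 0 wn)) := by
  simp only [pv_len]
  by_cases hw : wn ≤ 0
  · have hmax : max 0 wn = 0 := by omega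
    simp only [hmax, mul_zero, add_zero]
    rw [PySem.List.pyRange_one_eq_nil hw]
    simp [PySem.List.slice, PySem.List.clampIdx]
  · replace hw : 0 < wn := by omega
    have hmax : max 0 wn = wn := by omega
    simp only [hmax]
    have hwn : wn = (wn.toNat : Int) := by omega
    set w := wn.toNat with hwdef
    set p := PySem.Int.mod (i * wn) 49 with hpdef
    have hpE : p = (i * wn) % 49 := by
      rw [hpdef, PySem.Int.mod_eq_emod_of_pos (by norm_num)]
    have hp0 : 0 ≤ p := by rw [hpE]; exact Int.emod_nonneg _ (by norm_num)
    have hpcast : p = (p.toNat : Int) := by omega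
    set pN := p.toNat with hpN
    rw [hwn, hpcast, pv_chunk_eq pN w]
    rw [PySem.List.foldl_append_singleton_eq_map, List.nil_append]
    rw [PySem.List.pyRange_zero_natCast w, List.map_map]
    rw [PySem.List.slice_to_natCast, List.take_of_length_le (by simp)]
    apply List.map_congr_left
    intro k _
    simp only [Function.comp]
    congr 1
    rw [PySem.Int.mod_eq_emod_of_pos (by norm_num), PySem.Int.mod_eq_emod_of_pos (by norm_num)]
    have : (pN : Int) = (i * (w : Int)) % 49 := by rw [← hpcast, hpE, hwdef, ← hwn]
    omega

-- literal-prefix merge for the payload template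
theorem pv_str_merge (x y : String) :
    "\n        " ++ (("Request " ++ x) ++ y) = "\n        Request " ++ (x ++ y) := by
  simp only [String.append_assoc]
  rw [← String.append_assoc]
  rfl

-- the main loop with explicit fuel, carrying B's cursor invariant
theorem pv_loop_fuel (cnt wn : Int) : ∀ (fuel : Nat) (a : Int) (acc : List String), 0 ≤ a → (cnt - a).toNat ≤ fuel →

    (PySem.List.pyRange a cnt 1).foldl (fun payloads i =>
      payloads ++ [PySem.Str.strip ("\n        " ++ (("Request " ++ PySem.Int.toStr (i + 1)) ++ (": Please analyze the following concepts and provide insights on their relationships:\n        " ++ (PySem.Str.join " " (PySem.List.slice ((PySem.List.pyRange 0 wn 1).foldl (fun pw j => pw ++ [PySem.List.pyGetD pvBaseWords (PySem.Int.mod (i * wn + j) (pvBaseWords.length : Int)) ""]) []) none (some wn)) ++ "\n\n        Focus on practical applications and future implications.\n        "))))]) acc =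
    ((PySem.List.pyRange a cnt 1).foldl (fun (st : List String × Int) i =>
      (st.1 ++ [PySem.Str.strip ("\n        Request " ++ (PySem.Int.toStr (i + 1) ++ (": Please analyze the following concepts and provide insights on their relationships:\n        " ++ (PySem.Str.join " " (PySem.List.slice (PySem.List.pyRepeat pvBaseWords (PySem.Int.floordiv (st.2 + max 0 wn) (pvBaseWords.length : Int) + 1)) (some st.2) (some (st.2 + max 0 wn))) ++ "\n\n        Focus on practical applications and future implications.\n        "))))], PySem.Int.mod (st.2 + max 0 wn) (pvBaseWords.length : Int))) (acc, PySem.Int.mod (a * max 0 wn) (pvBaseWords.length : Int))).1 := by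
  intro fuel
  induction fuel with
  | zero =>
    intro a acc ha hf
    rw [show PySem.List.pyRange a cnt 1 = [] from PySem.List.pyRange_one_eq_nil (by omega)]
    rfl
  | succ fuel ih =>
    intro a acc ha hf
    by_cases hac : a < cnt
    · rw [show PySem.List.pyRange a cnt 1 = a :: PySem.List.pyRange (a + 1) cnt 1 from PySem.List.pyRange_one_cons hac]
      simp only [List.foldl_cons]
      have hwords := pv_words_eq a wn ha
      rw [hwords, pv_str_merge]
      have hpos : PySem.Int.mod (PySem.Int.mod (a * max 0 wn) (pvBaseWords.length : Int) + max 0 wn) (pvBaseWords.length : Int) = PySem.Int.mod ((a + 1) * max 0 wn) (pvBaseWords.length : Int) := by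
        simp only [pv_len]
        rw [PySem.Int.mod_eq_emod_of_pos (by norm_num), PySem.Int.mod_eq_emod_of_pos (by norm_num), PySem.Int.mod_eq_emod_of_pos (by norm_num)]
        have hexp : (a + 1) * max 0 wn = a * max 0 wn + max 0 wn := by ring
        rw [hexp]
        omega
      rw [hpos]
      exact ih (a + 1) _ (by omega) (by omega)
    · rw [show PySem.List.pyRange a cnt 1 = [] from PySem.List.pyRange_one_eq_nil (by omega)]
      rfl

-- the main loop equality
theorem pv_loop (cnt : Int) : ∀ (a : Int) (acc : List String) (wn : Int), 0 ≤ a →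
    (PySem.List.pyRange a cnt 1).foldl (fun payloads i =>
      payloads ++ [PySem.Str.strip ("\n        " ++ (("Request " ++ PySem.Int.toStr (i + 1)) ++ (": Please analyze the following concepts and provide insights on their relationships:\n        " ++ (PySem.Str.join " " (PySem.List.slice ((PySem.List.pyRange 0 wn 1).foldl (fun pw j => pw ++ [PySem.List.pyGetD pvBaseWords (PySem.Int.mod (i * wn + j) (pvBaseWords.length : Int)) ""]) []) none (some wn)) ++ "\n\n        Focus on practical applications and future implications.\n        "))))]) acc =
    ((PySem.List.pyRange a cnt 1).foldl (fun (st : List String × Int) i =>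
      (st.1 ++ [PySem.Str.strip ("\n        Request " ++ (PySem.Int.toStr (i + 1) ++ (": Please analyze the following concepts and provide insights on their relationships:\n        " ++ (PySem.Str.join " " (PySem.List.slice (PySem.List.pyRepeat pvBaseWords (PySem.Int.floordiv (st.2 + max 0 wn) (pvBaseWords.length : Int) + 1)) (some st.2) (some (st.2 + max 0 wn))) ++ "\n\n        Focus on practical applications and future implications.\n        "))))], PySem.Int.mod (st.2 + max 0 wn) (pvBaseWords.length : Int))) (acc, PySem.Int.mod (a * max 0 wn) (pvBaseWords.length : Int))).1 := by
  intro a acc wn ha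
  exact pv_loop_fuel cnt wn (cnt - a).toNat a acc ha le_rfl

-- ===== VERDICT (by name: the statement is the Claim_ definition above) =====
theorem generate_synthetic_payloads_spec : Claim_equal_generate_synthetic_payloads := by
  intro count tokens_per_payload _
  unfold Spec_generate_synthetic_payloads generate_synthetic_payloads generate_synthetic_payloads_alt
  have h := pv_loop count 0 [] (tokens_per_payload - 20) le_rfl
  simpa using h
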